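-- pv_equiv track=rewrite | github.com/EchoGrid-AI/EchoGrid | api/endpoints.py | validate_model_name
-- ===== SOURCE A (Python) =====
-- def validate_model_name(model_name: str) -> bool:
--     """
--     Validate model name format.
--
--     Args:
--         model_name (str): Model name to validate
--
--     Returns:
--         bool: True if model name is valid
--     """
--     if not model_name or not isinstance(model_name, str):
--         return False
--
--     # Must contain exactly one slash
--     parts = model_name.split('/')
--     if len(parts) != 2:
--         return False
--
--     username, modelname = parts
--
--     # Validate username and model name
--     if not username or not modelname:
--         return False
--
--     # Check for invalid characters (basic validation)
--     invalid_chars = set('<>:"|?*\\')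
--     if any(char in invalid_chars for char in model_name):
--         return False
--
--     return True
-- ===== SOURCE B (Python) =====
-- def validate_model_name(model_name: str) -> bool:
--     """Single left-to-right scan: reject forbidden chars, record the (unique)
--     slash position, then check both halves are non-empty."""
--     if not isinstance(model_name, str) or not model_name:
--         return False
--     slash = -1
--     for i, ch in enumerate(model_name):
--         if ch in '<>:"|?*\\':
--             return False
--         if ch == '/':
--             if slash != -1:
--                 return False
--             slash = i
--     return 0 < slash < len(model_name) - 1
-- ===== Notes on version B (the rewrite author's own statement) =====
-- stated objective: alternative
-- what changed: Replaced A's split-then-rescan (building the parts list, then a second full pass over the string for forbidden characters) by a single left-to-right scan with early exit that records the unique separator position and checks both halves non-empty arithmetically.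
import Mathlib
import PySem

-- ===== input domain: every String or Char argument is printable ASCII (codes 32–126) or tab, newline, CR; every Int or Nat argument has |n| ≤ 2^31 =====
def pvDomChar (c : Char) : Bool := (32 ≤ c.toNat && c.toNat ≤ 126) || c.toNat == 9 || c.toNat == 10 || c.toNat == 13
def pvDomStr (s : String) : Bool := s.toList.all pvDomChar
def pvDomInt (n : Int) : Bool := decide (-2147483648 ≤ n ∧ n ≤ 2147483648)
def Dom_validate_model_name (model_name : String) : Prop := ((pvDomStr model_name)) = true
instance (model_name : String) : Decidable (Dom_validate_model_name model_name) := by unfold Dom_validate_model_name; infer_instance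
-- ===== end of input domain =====

-- B replaces A's split-plus-rescan by one left-to-right scan tracking the separator position (alternative decomposition, same cost).

-- ===== PORT A =====
def pvInvalidChars : PySem.Set Char := PySem.Set.ofList "<>:\"|?*\\".toList

def validate_model_name (model_name : String) : Bool :=
  if PySem.Str.len model_name == 0 then false
  else
    match PySem.Str.split? model_name "/" with
    | none => false
    | some parts =>
      if parts.length ≠ 2 then false
      else
        match parts with
        | [username, modelname] =>
          if PySem.Str.len username == 0 || PySem.Str.len modelname == 0 then false
          else if model_name.toList.any (fun ch => PySem.Set.contains pvInvalidChars ch) then false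
          else true
        | _ => false

-- ===== PORT B =====
def pvForbidden : String := "<>:\"|?*\\"

-- the loop of Source B: index i, slash = position of the slash seen so far (-1 = none); none = early `return False`
def pvScan : List Char → Int → Int → Option Int
  | [], _, slash => some slash
  | ch :: rest, i, slash =>
    if PySem.Chars.isIn [ch] pvForbidden.toList then none
    else if ch = '/' then
      if slash ≠ -1 then none else pvScan rest (i + 1) i
    else pvScan rest (i + 1) slash

def validate_model_name_alt (model_name : String) : Bool :=
  if PySem.Str.len model_name == 0 then false
  else
    match pvScan model_name.toList 0 (-1) with
    | none => false
    | some slash => decide (0 < slash ∧ slash < PySem.Str.len model_name - 1)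

-- ===== PRECONDITION & SPEC =====
def Spec_validate_model_name (model_name : String) (out : Bool) : Prop := out = validate_model_name_alt model_name
instance (model_name : String) (out : Bool) : Decidable (Spec_validate_model_name model_name out) := by unfold Spec_validate_model_name; infer_instance

-- ===== CLAIM (what is proved, stated in full; the proofs are below) =====
def Claim_equal_validate_model_name : Prop := ∀ (model_name : String), Dom_validate_model_name model_name → Spec_validate_model_name model_name (validate_model_name model_name)

-- ===== LEMMAS AND PROOFS =====

def pvBadList : List Char := ['<', '>', ':', '"', '|', '?', '*', '\\']

lemma pvSingleton_infix_iff {c : Char} {l : List Char} : [c] <:+: l ↔ c ∈ l := by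
  constructor
  · intro h
    exact List.singleton_sublist.mp h.sublist
  · intro h
    obtain ⟨s, t, rfl⟩ := List.mem_iff_append.mp h
    exact ⟨s, t, by simp⟩

lemma pvB_bad_eq (c : Char) : PySem.Chars.isIn [c] pvForbidden.toList = decide (c ∈ pvBadList) := by
  have h : pvForbidden.toList = pvBadList := by decide
  by_cases hb : c ∈ pvBadList
  · simp [hb]
    rw [h, PySem.Chars.isIn_iff_infix, pvSingleton_infix_iff]
    exact hb
  · simp [hb]
    rw [← Bool.not_eq_true, h, PySem.Chars.isIn_iff_infix, pvSingleton_infix_iff]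
    exact hb

lemma pvA_bad_eq (c : Char) : PySem.Set.contains pvInvalidChars c = decide (c ∈ pvBadList) := by
  have h : pvInvalidChars = pvBadList := by decide
  simp [PySem.Set.contains, h, List.contains_iff_mem]

-- the pieces produced by str.split('/'), as a structural recursion (cur = current piece, reversed)
def pvPieces : List Char → List Char → List (List Char)
  | cur, [] => [cur.reverse]
  | cur, c :: rest => if c = '/' then cur.reverse :: pvPieces [] rest else pvPieces (c :: cur) rest

lemma pvGo_eq (l : List Char) : ∀ (fuel : Nat) (cur : List Char) (acc : List (List Char)),
    l.length < fuel →
    PySem.Chars.splitOn.go ['/'] fuel l cur acc = acc.reverse ++ pvPieces cur l := by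
  induction l with
  | nil =>
    intro fuel cur acc hf
    cases fuel with
    | zero => omega
    | succ f => simp [PySem.Chars.splitOn.go, pvPieces]
  | cons c rest ih =>
    intro fuel cur acc hf
    cases fuel with
    | zero => simp at hf
    | succ f =>
      have hrest : rest.length < f := by simp at hf; omega
      by_cases hc : c = '/'
      · subst hc
        simp only [PySem.Chars.splitOn.go, List.isPrefixOf, beq_self_eq_true, Bool.and_self,
          if_true, List.length_cons, List.drop_succ_cons, List.length_nil, List.drop_zero]
        rw [ih f [] (cur.reverse :: acc) hrest]
        simp [pvPieces]
      · have hbeq : (['/'].isPrefixOf (c :: rest)) = false := by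
          simp [List.isPrefixOf]
          exact fun h => hc h.symm
        simp only [PySem.Chars.splitOn.go, hbeq, Bool.false_eq_true, if_false]
        rw [ih f (c :: cur) acc hrest]
        simp [pvPieces, hc]

lemma pvSplitOn_eq (cs : List Char) : PySem.Chars.splitOn cs ['/'] = pvPieces [] cs := by
  unfold PySem.Chars.splitOn
  rw [pvGo_eq cs (cs.length + 1) [] [] (by omega)]
  simp

lemma pvPieces_length (l : List Char) : ∀ cur, (pvPieces cur l).length = l.count '/' + 1 := by
  induction l with
  | nil => intro cur; simp [pvPieces]
  | cons c rest ih =>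
    intro cur
    by_cases hc : c = '/'
    · subst hc; simp [pvPieces, ih, List.count_cons]
    · simp [pvPieces, hc, ih, List.count_cons]

lemma pvPieces_no_slash (l : List Char) (h : '/' ∉ l) : ∀ cur, pvPieces cur l = [cur.reverse ++ l] := by
  induction l with
  | nil => intro cur; simp [pvPieces]
  | cons c rest ih =>
    intro cur
    have hc : c ≠ '/' := fun hh => h (hh ▸ List.mem_cons_self)
    have hr : '/' ∉ rest := fun hm => h (List.mem_cons_of_mem _ hm)
    simp [pvPieces, hc, ih hr]

lemma pvPieces_split (a : List Char) (b : List Char) (h : '/' ∉ a) :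
    ∀ cur, pvPieces cur (a ++ '/' :: b) = (cur.reverse ++ a) :: pvPieces [] b := by
  induction a with
  | nil => intro cur; simp [pvPieces]
  | cons c a' ih =>
    intro cur
    have hc : c ≠ '/' := fun hh => h (hh ▸ List.mem_cons_self)
    have ha' : '/' ∉ a' := fun hm => h (List.mem_cons_of_mem _ hm)
    simp [pvPieces, hc, ih ha']

lemma pvScan_no_slash (l : List Char) (h : '/' ∉ l) : ∀ (i slash : Int),
    pvScan l i slash = if l.any (fun c => decide (c ∈ pvBadList)) then none else some slash := by
  induction l with
  | nil => intro i slash; simp [pvScan]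
  | cons c rest ih =>
    intro i slash
    have hc : c ≠ '/' := fun hh => h (hh ▸ List.mem_cons_self)
    have hr : '/' ∉ rest := fun hm => h (List.mem_cons_of_mem _ hm)
    by_cases hb : c ∈ pvBadList
    · simp [pvScan, pvB_bad_eq, hb]
    · simp [pvScan, pvB_bad_eq, hb, hc, ih hr]

lemma pvScan_second_slash (l : List Char) : ∀ (i slash : Int), 0 ≤ slash → '/' ∈ l →
    pvScan l i slash = none := by
  induction l with
  | nil => intro i slash _ hm; simp at hm
  | cons c rest ih =>
    intro i slash hs hm
    by_cases hb : c ∈ pvBadList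
    · simp [pvScan, pvB_bad_eq, hb]
    · by_cases hc : c = '/'
      · subst hc
        simp [pvScan, pvB_bad_eq, hb, show slash ≠ -1 by omega]
      · have hm' : '/' ∈ rest := by
          rcases List.mem_cons.mp hm with h1 | h1
          · exact absurd h1.symm hc
          · exact h1
        simp [pvScan, pvB_bad_eq, hb, hc, ih (i + 1) slash hs hm']

lemma pvScan_clean_prefix (a : List Char) (ha : '/' ∉ a) (hcl : ∀ c ∈ a, c ∉ pvBadList) :
    ∀ (l : List Char) (i slash : Int), pvScan (a ++ l) i slash = pvScan l (i + a.length) slash := by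
  induction a with
  | nil => intro l i slash; simp
  | cons c a' ih =>
    intro l i slash
    have hc : c ≠ '/' := fun hh => ha (hh ▸ List.mem_cons_self)
    have ha' : '/' ∉ a' := fun hm => ha (List.mem_cons_of_mem _ hm)
    have hb : c ∉ pvBadList := hcl c List.mem_cons_self
    have hcl' : ∀ x ∈ a', x ∉ pvBadList := fun x hx => hcl x (List.mem_cons_of_mem _ hx)
    simp only [List.cons_append]
    simp [pvScan, pvB_bad_eq, hb, hc, ih ha' hcl']
    congr 1
    push_cast
    ring

lemma pvScan_bad_prefix (a : List Char) (ha : '/' ∉ a) :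
    ∀ (l : List Char) (i slash : Int), (∃ c ∈ a, c ∈ pvBadList) → pvScan (a ++ l) i slash = none := by
  induction a with
  | nil => intro l i slash hex; simp at hex
  | cons c a' ih =>
    intro l i slash hex
    have hc : c ≠ '/' := fun hh => ha (hh ▸ List.mem_cons_self)
    have ha' : '/' ∉ a' := fun hm => ha (List.mem_cons_of_mem _ hm)
    by_cases hb : c ∈ pvBadList
    · simp [pvScan, pvB_bad_eq, hb]
    · have hex' : ∃ x ∈ a', x ∈ pvBadList := by
        rcases hex with ⟨x, hx, hxb⟩
        rcases List.mem_cons.mp hx with h1 | h1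
        · exact absurd (h1 ▸ hxb) hb
        · exact ⟨x, h1, hxb⟩
      simp [pvScan, pvB_bad_eq, hb, hc, ih ha' l (i + 1) slash hex']

lemma pvScan_two_slashes (l : List Char) : ∀ (i : Int), 0 ≤ i → 2 ≤ l.count '/' →
    pvScan l i (-1) = none := by
  induction l with
  | nil => intro i _ h2; simp at h2
  | cons c rest ih =>
    intro i hi h2
    by_cases hb : c ∈ pvBadList
    · simp [pvScan, pvB_bad_eq, hb]
    · by_cases hc : c = '/'
      · subst hc
        have hm : '/' ∈ rest := by
          apply List.count_pos_iff.mp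
          have : rest.count '/' + 1 = (('/' :: rest).count '/') := by simp [List.count_cons]
          omega
        simp [pvScan, pvB_bad_eq, hb, pvScan_second_slash rest (i + 1) i hi hm]
      · have h2' : 2 ≤ rest.count '/' := by
          have : (c :: rest).count '/' = rest.count '/' := by simp [List.count_cons, hc]
          omega
        simp [pvScan, pvB_bad_eq, hb, hc, ih (i + 1) (by omega) h2']

-- ===== VERDICT (by name: the statement is the Claim_ definition above) =====
theorem validate_model_name_spec : Claim_equal_validate_model_name := by
  intro s _hdom
  unfold Spec_validate_model_name
  by_cases hne : s.toList = []
  · simp [validate_model_name, validate_model_name_alt, PySem.Str.len, hne]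
  · have hlenne : (PySem.Str.len s == 0) = false := by
      simp [PySem.Str.len]
      exact fun h => hne (by rw [h]; rfl)
    have hsplit : PySem.Str.split? s "/" = some ((pvPieces [] s.toList).map String.ofList) := by
      simp [PySem.Str.split?, PySem.Chars.split?]
      rw [pvSplitOn_eq]
    by_cases h0 : s.toList.count '/' = 0
    · have hnos : '/' ∉ s.toList := List.count_eq_zero.mp h0
      have hA : validate_model_name s = false := by
        simp [validate_model_name, hlenne, hsplit, pvPieces_no_slash _ hnos]
      have hB : validate_model_name_alt s = false := by
        simp only [validate_model_name_alt, hlenne, Bool.false_eq_true, if_false,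
          pvScan_no_slash _ hnos 0 (-1)]
        by_cases hany : s.toList.any (fun c => decide (c ∈ pvBadList)) = true
        · simp [hany]
        · simp only [Bool.not_eq_true] at hany
          simp [hany]
      rw [hA, hB]
    · by_cases h1 : s.toList.count '/' = 1
      · have hm : '/' ∈ s.toList := List.count_pos_iff.mp (by omega)
        obtain ⟨a, t, hst⟩ := List.mem_iff_append.mp hm
        have hcnt : a.count '/' = 0 ∧ t.count '/' = 0 := by
          rw [hst] at h1
          simp [List.count_append, List.count_cons] at h1
          omega
        have hna : '/' ∉ a := List.count_eq_zero.mp hcnt.1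
        have hnt : '/' ∉ t := List.count_eq_zero.mp hcnt.2
        have hlen : s.toList.length = a.length + 1 + t.length := by
          rw [hst]; simp; omega
        have hA : validate_model_name s =
            (if a.length = 0 ∨ t.length = 0 then false
             else if s.toList.any (fun c => decide (c ∈ pvBadList)) then false else true) := by
          simp only [validate_model_name, hlenne, Bool.false_eq_true, if_false, hsplit]
          rw [hst, pvPieces_split a t hna]
          rw [pvPieces_no_slash t hnt]
          simp only [List.reverse_nil, List.nil_append, List.map_cons, List.map_nil,
            List.length_cons, List.length_nil]
          rw [if_neg (by omega)]
          simp only [PySem.Str.len, String.toList_ofList, pvA_bad_eq, ← hst]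
          by_cases hae : a.length = 0 <;> by_cases hte : t.length = 0 <;>
            simp [hae, hte] <;> omega
        have hB : validate_model_name_alt s =
            (if (a ++ '/' :: t).any (fun c => decide (c ∈ pvBadList)) then false
             else decide (0 < (a.length : Int) ∧ (a.length : Int) < (a.length : Int) + 1 + t.length - 1)) := by
          simp only [validate_model_name_alt, hlenne, Bool.false_eq_true, if_false]
          by_cases hbada : ∃ c ∈ a, c ∈ pvBadList
          · rw [hst, pvScan_bad_prefix a hna _ 0 (-1) hbada]
            have : (a ++ '/' :: t).any (fun c => decide (c ∈ pvBadList)) = true := by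
              rcases hbada with ⟨c, hc, hcb⟩
              exact List.any_eq_true.mpr ⟨c, List.mem_append_left _ hc, by simpa using hcb⟩
            simp [this]
          · push_neg at hbada
            rw [hst, pvScan_clean_prefix a hna hbada ('/' :: t) 0 (-1)]
            have hslash_notbad : ('/' : Char) ∉ pvBadList := by decide
            simp only [pvScan, pvB_bad_eq, hslash_notbad, decide_false, Bool.false_eq_true,
              if_false, if_pos rfl, ne_eq, neg_neg, not_true_eq_false, if_true]
            rw [pvScan_no_slash t hnt]
            have hanyeq : (a ++ '/' :: t).any (fun c => decide (c ∈ pvBadList)) =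
                t.any (fun c => decide (c ∈ pvBadList)) := by
              simp [List.any_append, List.any_cons, hslash_notbad]
              intro c hc hcb
              exact absurd hcb (hbada c hc)
            rw [hanyeq]
            by_cases hant : t.any (fun c => decide (c ∈ pvBadList)) = true
            · simp [hant]
            · simp only [Bool.not_eq_true] at hant
              simp only [hant, Bool.false_eq_true, if_false]
              simp only [PySem.Str.len, hlen]
              norm_num
        rw [hA, hB, hst]
        by_cases hany : (a ++ '/' :: t).any (fun c => decide (c ∈ pvBadList)) = true
        · simp [hany]
        · simp only [Bool.not_eq_true] at hany
          by_cases hae : a.length = 0 <;> by_cases hte : t.length = 0 <;>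
            simp [hany, hae, hte] <;> omega
      · have h2 : 2 ≤ s.toList.count '/' := by omega
        have hA : validate_model_name s = false := by
          simp only [validate_model_name, hlenne, Bool.false_eq_true, if_false, hsplit]
          rw [if_pos]
          simp [pvPieces_length]
          omega
        have hB : validate_model_name_alt s = false := by
          simp [validate_model_name_alt, hlenne, pvScan_two_slashes s.toList 0 (by omega) h2]
        rw [hA, hB]
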